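-- pv_equiv track=rewrite | github.com/aorangehc/Daily-coding | 字节豆包MarsCode-青训营-寒假专场/codes/Python/数列差异的最小化.py | solution
-- ===== SOURCE A (Python) =====
-- def solution(n: int, m: int, k: int, a: list[int], b: list[int]) -> int:
--     k_squared = k ** 2
--     min_diff = float('inf')  # 初始化最小差值为正无穷
--
--     for i in range(len(a)):
--         for j in range(len(b)):
--             diff_squared = (a[i] - b[j]) ** 2
--             current_diff = abs(diff_squared - k_squared)
--             if current_diff < min_diff:
--                 min_diff = current_diff
--
--     return int(min_diff)
-- ===== SOURCE B (Python) =====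
-- def _bisect_left(bs, t):
--     lo, hi = 0, len(bs)
--     while lo < hi:
--         mid = (lo + hi) // 2
--         if bs[mid] < t:
--             lo = mid + 1
--         else:
--             hi = mid
--     return lo
--
--
-- def solution(n: int, m: int, k: int, a: list[int], b: list[int]) -> int:
--     # |(x-y)^2 - k^2| is minimised, over y, near y = x - |k| and y = x + |k|;
--     # on a sorted b it suffices to probe the neighbours of those two targets.
--     bs = sorted(b)
--     kk = abs(k)
--     ksq = k * k
--     best = None
--     for x in a:
--         for t in (x - kk, x + kk):
--             i = _bisect_left(bs, t)
--             for j in (i - 1, i):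
--                 if 0 <= j < len(bs):
--                     d = abs((x - bs[j]) ** 2 - ksq)
--                     if best is None or d < best:
--                         best = d
--     return best
-- ===== Notes on version B (the rewrite author's own statement) =====
-- stated objective: faster
-- what changed: Instead of scanning all n*m pairs, B sorts b once and for each a_i binary-searches the two targets a_i-|k| and a_i+|k| in the sorted b, checking only the neighbouring elements, which provably dominate every other pair; Pre_ excludes empty a or b, where A raises OverflowError on int(float('inf')).
import Mathlib
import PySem

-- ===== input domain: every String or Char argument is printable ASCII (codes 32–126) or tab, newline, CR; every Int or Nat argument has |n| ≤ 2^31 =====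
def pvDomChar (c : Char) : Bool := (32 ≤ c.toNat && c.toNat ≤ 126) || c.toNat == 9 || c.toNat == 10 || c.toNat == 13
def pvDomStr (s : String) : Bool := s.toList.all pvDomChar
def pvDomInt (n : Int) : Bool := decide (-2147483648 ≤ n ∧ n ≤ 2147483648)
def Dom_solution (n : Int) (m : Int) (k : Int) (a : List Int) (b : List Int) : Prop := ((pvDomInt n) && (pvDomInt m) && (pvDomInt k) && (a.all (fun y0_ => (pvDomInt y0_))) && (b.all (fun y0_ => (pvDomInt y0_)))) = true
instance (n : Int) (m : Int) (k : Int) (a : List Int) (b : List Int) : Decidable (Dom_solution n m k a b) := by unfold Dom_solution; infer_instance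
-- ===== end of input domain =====

-- B replaces A's scan of all n*m pairs by sorting b and binary-searching the two targets
-- a_i±|k| for each a_i (objective: faster, asymptotically).

-- running-minimum update used by both Pythons ('min_diff = inf' / 'best = None' is the none accumulator)
def pyMinUpd (acc : Option Int) (d : Int) : Option Int :=
  match acc with
  | none => some d
  | some m => if d < m then some d else some m

-- ===== PORT A =====
def solution (n : Int) (m : Int) (k : Int) (a : List Int) (b : List Int) : Int :=
  let ksq := k ^ 2
  let md := (PySem.List.pyRange 0 (a.length : Int) 1).foldl (fun acc i =>
    (PySem.List.pyRange 0 (b.length : Int) 1).foldl (fun acc j =>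
      pyMinUpd acc (|((PySem.List.pyGetD a i 0) - (PySem.List.pyGetD b j 0)) ^ 2 - ksq|)) acc) none
  -- int(min_diff): min_diff is still inf (none) only when a or b is empty, where Python raises
  -- OverflowError — excluded by Pre_solution; pyGetD is exact since i, j are in range
  md.getD 0

-- ===== PORT B =====
def solution_alt (n : Int) (m : Int) (k : Int) (a : List Int) (b : List Int) : Int :=
  let bs := PySem.List.sorted b (fun v => v) false
  let kk := |k|
  let ksq := k * k
  -- _bisect_left in Source B is the standard lo/hi loop = PySem.List.bisectLeft
  let best := a.foldl (fun acc x =>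
    [x - kk, x + kk].foldl (fun acc t =>
      let i : Int := (PySem.List.bisectLeft bs t : Int)
      [i - 1, i].foldl (fun acc j =>
        if 0 ≤ j ∧ j < (bs.length : Int) then
          pyMinUpd acc (|(x - PySem.List.pyGetD bs j 0) ^ 2 - ksq|)
        else acc) acc) acc) none
  -- Python B returns best, which is None only when a or b is empty — outside Pre_solution
  best.getD 0

-- ===== PRECONDITION & SPEC =====
-- Pre_ excludes empty a or b: there A's min_diff stays float('inf') and int(min_diff) raises OverflowError.
def Pre_solution (n : Int) (m : Int) (k : Int) (a : List Int) (b : List Int) : Prop := a ≠ [] ∧ b ≠ []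
instance (n : Int) (m : Int) (k : Int) (a : List Int) (b : List Int) : Decidable (Pre_solution n m k a b) := by unfold Pre_solution; infer_instance

def pvWitness_solution : Int × Int × Int × List Int × List Int := (2, 2, 1, [1, 5], [2, 9])

def Spec_solution (n : Int) (m : Int) (k : Int) (a : List Int) (b : List Int) (out : Int) : Prop := out = solution_alt n m k a b
instance (n : Int) (m : Int) (k : Int) (a : List Int) (b : List Int) (out : Int) : Decidable (Spec_solution n m k a b out) := by unfold Spec_solution; infer_instance

-- ===== CLAIM (what is proved, stated in full; the proofs are below) =====
def Claim_equal_solution : Prop := ∀ (n : Int) (m : Int) (k : Int) (a : List Int) (b : List Int), Dom_solution n m k a b → Pre_solution n m k a b → Spec_solution n m k a b (solution n m k a b)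

-- ===== LEMMAS AND PROOFS =====

-- value minimised by both programs (A writes k^2 as k ** 2, B as k * k)
def fval (k x y : Int) : Int := |(x - y) ^ 2 - k * k|

-- candidate values B inspects for a given x, as a plain list (mirrors the port's inner folds)
def candsOf (k : Int) (bs : List Int) (x : Int) : List Int :=
  [x - |k|, x + |k|].flatMap (fun t =>
    (([((PySem.List.bisectLeft bs t : Int)) - 1, (PySem.List.bisectLeft bs t : Int)].filter
        (fun j => decide (0 ≤ j ∧ j < (bs.length : Int)))).map
      (fun j => |(x - PySem.List.pyGetD bs j 0) ^ 2 - k * k|)))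

theorem foldl_upd_flat {α : Type} (F : α → List Int) (l : List α) (acc : Option Int) :
    l.foldl (fun acc x => (F x).foldl pyMinUpd acc) acc = (l.flatMap F).foldl pyMinUpd acc := by
  induction l generalizing acc with
  | nil => rfl
  | cons h t ih => simp [List.flatMap_cons, List.foldl_append, ih]

theorem foldl_upd_filter_map (P : Int → Prop) [DecidablePred P] (g : Int → Int) (l : List Int)
    (acc : Option Int) :
    l.foldl (fun acc j => if P j then pyMinUpd acc (g j) else acc) acc
      = ((l.filter (fun j => decide (P j))).map g).foldl pyMinUpd acc := by
  induction l generalizing acc with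
  | nil => rfl
  | cons h t ih =>
    by_cases hp : P h
    · simp [hp, ih]
    · simp [hp, ih]

theorem foldl_upd_map {α : Type} (g : α → Int) (l : List α) (acc : Option Int) :
    l.foldl (fun acc y => pyMinUpd acc (g y)) acc = (l.map g).foldl pyMinUpd acc := by
  induction l generalizing acc with
  | nil => rfl
  | cons h t ih => simp [ih]

theorem solution_eq (n m k : Int) (a b : List Int) :
    solution n m k a b
      = ((a.flatMap (fun x => b.map (fun y => fval k x y))).foldl pyMinUpd none).getD 0 := by
  show ((PySem.List.pyRange 0 (a.length : Int) 1).foldl (fun acc i =>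
      (PySem.List.pyRange 0 (b.length : Int) 1).foldl (fun acc j =>
        pyMinUpd acc (|((PySem.List.pyGetD a i 0) - (PySem.List.pyGetD b j 0)) ^ 2 - k ^ 2|)) acc) none).getD 0 = _
  rw [PySem.List.foldl_pyRange_zero_pyGetD' a 0
    (fun acc x => (PySem.List.pyRange 0 (b.length : Int) 1).foldl
      (fun acc j => pyMinUpd acc (|(x - PySem.List.pyGetD b j 0) ^ 2 - k ^ 2|)) acc) none]
  have hb : ∀ (x : Int) (acc : Option Int),
      (PySem.List.pyRange 0 (b.length : Int) 1).foldl
        (fun acc j => pyMinUpd acc (|(x - PySem.List.pyGetD b j 0) ^ 2 - k ^ 2|)) acc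
      = (b.map (fun y => fval k x y)).foldl pyMinUpd acc := by
    intro x acc
    rw [PySem.List.foldl_pyRange_zero_pyGetD' b 0
      (fun acc y => pyMinUpd acc (|(x - y) ^ 2 - k ^ 2|)) acc]
    have hfv : (fun (acc : Option Int) (y : Int) => pyMinUpd acc (|(x - y) ^ 2 - k ^ 2|))
        = fun acc y => pyMinUpd acc (fval k x y) := by
      funext acc y; unfold fval; ring_nf
    rw [hfv, foldl_upd_map]
  calc (a.foldl (fun acc x =>
        (PySem.List.pyRange 0 (b.length : Int) 1).foldl
          (fun acc j => pyMinUpd acc (|(x - PySem.List.pyGetD b j 0) ^ 2 - k ^ 2|)) acc) none).getD 0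
      = (a.foldl (fun acc x => (b.map (fun y => fval k x y)).foldl pyMinUpd acc) none).getD 0 := by
        congr 1
        exact List.foldl_ext _ _ none (fun acc x _ => hb x acc)
    _ = _ := by rw [foldl_upd_flat]

theorem solution_alt_eq (n m k : Int) (a b : List Int) :
    solution_alt n m k a b
      = ((a.flatMap (candsOf k (PySem.List.sorted b (fun v => v) false))).foldl pyMinUpd none).getD 0 := by
  show (a.foldl (fun acc x =>
      [x - |k|, x + |k|].foldl (fun acc t =>
        [(PySem.List.bisectLeft (PySem.List.sorted b (fun v => v) false) t : Int) - 1,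
         (PySem.List.bisectLeft (PySem.List.sorted b (fun v => v) false) t : Int)].foldl (fun acc j =>
          if 0 ≤ j ∧ j < ((PySem.List.sorted b (fun v => v) false).length : Int) then
            pyMinUpd acc (|(x - PySem.List.pyGetD (PySem.List.sorted b (fun v => v) false) j 0) ^ 2 - k * k|)
          else acc) acc) acc) none).getD 0
    = ((a.flatMap (candsOf k (PySem.List.sorted b (fun v => v) false))).foldl pyMinUpd none).getD 0
  congr 1
  rw [← foldl_upd_flat]
  apply List.foldl_ext
  intro acc x _
  unfold candsOf
  rw [← foldl_upd_flat]
  apply List.foldl_ext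
  intro acc t _
  rw [foldl_upd_filter_map (fun j => 0 ≤ j ∧ j < ((PySem.List.sorted b (fun v => v) false).length : Int))]

theorem cands_sub (k : Int) (bs : List Int) (x v : Int) (hv : v ∈ candsOf k bs x) :
    ∃ y ∈ bs, v = fval k x y := by
  unfold candsOf at hv
  simp only [List.mem_flatMap, List.mem_map, List.mem_filter, List.mem_cons,
    List.not_mem_nil, or_false, decide_eq_true_eq] at hv
  obtain ⟨t, _, j, ⟨_, h0, hl⟩, rfl⟩ := hv
  lift j to Nat using h0 with j
  rw [PySem.List.pyGetD_natCast]
  have hjl : j < bs.length := by exact_mod_cast hl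
  rw [List.getD_eq_getElem bs 0 hjl]
  exact ⟨bs[j], List.getElem_mem hjl, rfl⟩

theorem mem_candsOf (k : Int) (bs : List Int) (x t : Int) (ht : t = x - |k| ∨ t = x + |k|)
    (j : Nat) (hj : (j : Int) = (PySem.List.bisectLeft bs t : Int) - 1 ∨ (j : Int) = (PySem.List.bisectLeft bs t : Int))
    (hl : j < bs.length) :
    fval k x (bs[j]) ∈ candsOf k bs x := by
  unfold candsOf
  simp only [List.mem_flatMap, List.mem_map, List.mem_filter, List.mem_cons,
    List.not_mem_nil, or_false, decide_eq_true_eq]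
  refine ⟨t, by tauto, (j : Int), ⟨hj, by positivity, by exact_mod_cast hl⟩, ?_⟩
  rw [PySem.List.pyGetD_natCast, List.getD_eq_getElem bs 0 hl]
  rfl

theorem fval_mono_low (k x c y : Int) (h1 : y ≤ c) (h2 : c ≤ x - |k|) :
    fval k x c ≤ fval k x y := by
  unfold fval
  have hk : 0 ≤ |k| := abs_nonneg k
  have hkk : |k| * |k| = k * k := abs_mul_abs_self k
  have h3 : k * k ≤ (x - c) ^ 2 := by nlinarith
  rw [abs_of_nonneg (by linarith)]
  calc (x - c) ^ 2 - k * k ≤ (x - y) ^ 2 - k * k := by nlinarith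
    _ ≤ |(x - y) ^ 2 - k * k| := le_abs_self _

theorem fval_mono_high (k x c y : Int) (h1 : c ≤ y) (h2 : x + |k| ≤ c) :
    fval k x c ≤ fval k x y := by
  have := fval_mono_low k (-x) (-c) (-y) (by linarith) (by linarith)
  unfold fval at this ⊢
  have e1 : (-x - -c) ^ 2 = (x - c) ^ 2 := by ring
  have e2 : (-x - -y) ^ 2 = (x - y) ^ 2 := by ring
  rwa [e1, e2] at this

theorem fval_mono_mid_left (k x c y : Int) (h1 : x - |k| ≤ c) (h2 : c ≤ y) (h3 : y ≤ x) :
    fval k x c ≤ fval k x y := by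
  unfold fval
  have hk : 0 ≤ |k| := abs_nonneg k
  have hkk : |k| * |k| = k * k := abs_mul_abs_self k
  have h4 : (x - c) ^ 2 ≤ k * k := by nlinarith
  rw [abs_of_nonpos (by linarith)]
  calc -((x - c) ^ 2 - k * k) ≤ -((x - y) ^ 2 - k * k) := by nlinarith
    _ ≤ |(x - y) ^ 2 - k * k| := neg_le_abs _

theorem fval_mono_mid_right (k x c y : Int) (h1 : y ≤ c) (h2 : c ≤ x + |k|) (h3 : x ≤ y) :
    fval k x c ≤ fval k x y := by
  have := fval_mono_mid_left k (-x) (-c) (-y) (by linarith) (by linarith) (by linarith)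
  unfold fval at this ⊢
  have e1 : (-x - -c) ^ 2 = (x - c) ^ 2 := by ring
  have e2 : (-x - -y) ^ 2 = (x - y) ^ 2 := by ring
  rwa [e1, e2] at this

theorem sorted_le_of_le (bs : List Int) (hs : bs.Pairwise (· ≤ ·)) {i j : Nat} (hij : i ≤ j)
    (hj : j < bs.length) : bs[i]'(lt_of_le_of_lt hij hj) ≤ bs[j] := by
  rcases eq_or_lt_of_le hij with rfl | hlt
  · exact le_refl _
  · exact List.pairwise_iff_getElem.mp hs i j _ hj hlt

theorem cands_dom (k x y : Int) (bs : List Int) (hs : bs.Pairwise (· ≤ ·)) (hy : y ∈ bs) :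
    ∃ v ∈ candsOf k bs x, v ≤ fval k x y := by
  obtain ⟨jy, hjy, rfl⟩ := List.mem_iff_getElem.mp hy
  set t1 := x - |k| with ht1
  set t2 := x + |k| with ht2
  obtain ⟨hi1len, hi1lt, hi1ge⟩ := PySem.List.bisectLeft_spec bs t1 hs
  obtain ⟨hi2len, hi2lt, hi2ge⟩ := PySem.List.bisectLeft_spec bs t2 hs
  set i1 := PySem.List.bisectLeft bs t1 with hi1
  set i2 := PySem.List.bisectLeft bs t2 with hi2
  by_cases hc1 : bs[jy] < t1
  · -- below the low target: take the last element < t1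
    have hjlt : jy < i1 := by
      by_contra h
      exact absurd (hi1ge jy hjy (le_of_not_gt h)) (not_le.mpr hc1)
    have h1pos : 1 ≤ i1 := Nat.one_le_iff_ne_zero.mpr (by omega)
    have hcl : i1 - 1 < bs.length := by omega
    refine ⟨fval k x (bs[i1 - 1]), mem_candsOf k bs x t1 (Or.inl rfl) (i1 - 1) (Or.inl (by omega)) hcl, ?_⟩
    exact fval_mono_low k x _ _ (sorted_le_of_le bs hs (by omega) hcl)
      (le_of_lt (hi1lt (i1 - 1) hcl (by omega)))
  · by_cases hc2 : t2 ≤ bs[jy]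
    · -- above the high target: take the first element ≥ t2
      have hjge : i2 ≤ jy := by
        by_contra h
        exact absurd (hi2lt jy hjy (lt_of_not_ge h)) (not_lt.mpr hc2)
      have hcl : i2 < bs.length := lt_of_le_of_lt hjge hjy
      refine ⟨fval k x (bs[i2]), mem_candsOf k bs x t2 (Or.inr rfl) i2 (Or.inr rfl) hcl, ?_⟩
      exact fval_mono_high k x _ _ (sorted_le_of_le bs hs hjge hjy) (hi2ge i2 hcl le_rfl)
    · by_cases hc3 : bs[jy] ≤ x
      · -- t1 ≤ y ≤ x: take the first element ≥ t1
        have hjge : i1 ≤ jy := by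
          by_contra h
          exact absurd (hi1lt jy hjy (lt_of_not_ge h)) hc1
        have hcl : i1 < bs.length := lt_of_le_of_lt hjge hjy
        refine ⟨fval k x (bs[i1]), mem_candsOf k bs x t1 (Or.inl rfl) i1 (Or.inr rfl) hcl, ?_⟩
        exact fval_mono_mid_left k x _ _ (hi1ge i1 hcl le_rfl)
          (sorted_le_of_le bs hs hjge hjy) hc3
      · -- x < y < t2: take the last element < t2
        have hjlt : jy < i2 := by
          by_contra h
          exact absurd (hi2ge jy hjy (le_of_not_gt h)) hc2
        have h2pos : 1 ≤ i2 := Nat.one_le_iff_ne_zero.mpr (by omega)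
        have hcl : i2 - 1 < bs.length := by omega
        refine ⟨fval k x (bs[i2 - 1]), mem_candsOf k bs x t2 (Or.inr rfl) (i2 - 1) (Or.inl (by omega)) hcl, ?_⟩
        exact fval_mono_mid_right k x _ _ (sorted_le_of_le bs hs (by omega) hcl)
          (le_of_lt (hi2lt (i2 - 1) hcl (by omega))) (le_of_not_ge hc3)

theorem cands_ne_nil (k : Int) (bs : List Int) (hs : bs.Pairwise (· ≤ ·)) (hbs : bs ≠ [])
    (x : Int) : ∃ v, v ∈ candsOf k bs x := by
  have hlen : 0 < bs.length := List.length_pos_iff.mpr hbs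
  obtain ⟨hi1len, _, _⟩ := PySem.List.bisectLeft_spec bs (x - |k|) hs
  by_cases h0 : PySem.List.bisectLeft bs (x - |k|) = 0
  · exact ⟨_, mem_candsOf k bs x (x - |k|) (Or.inl rfl) 0 (Or.inr (by rw [h0])) hlen⟩
  · refine ⟨_, mem_candsOf k bs x (x - |k|) (Or.inl rfl) (PySem.List.bisectLeft bs (x - |k|) - 1)
      (Or.inl (by omega)) (by omega)⟩
theorem minFold_some (l : List Int) (m : Int) :
    ∃ v, l.foldl pyMinUpd (some m) = some v ∧ (v = m ∨ v ∈ l) ∧ v ≤ m ∧ ∀ w ∈ l, v ≤ w := by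
  induction l generalizing m with
  | nil => exact ⟨m, rfl, Or.inl rfl, le_refl _, by simp⟩
  | cons h t ih =>
    simp only [List.foldl_cons, pyMinUpd]
    by_cases hc : h < m
    · simp only [if_pos hc]
      obtain ⟨v, hv, hmem, hle, hall⟩ := ih h
      exact ⟨v, hv, Or.inr (hmem.elim (fun e => e ▸ List.mem_cons_self ..) (fun hm => List.mem_cons_of_mem _ hm)),
        (lt_of_le_of_lt hle hc).le, by
          intro w hw
          rcases List.mem_cons.mp hw with rfl | hw
          · exact hle
          · exact hall w hw⟩
    · simp only [if_neg hc]
      obtain ⟨v, hv, hmem, hle, hall⟩ := ih m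
      refine ⟨v, hv, hmem.elim Or.inl (fun hm => Or.inr (List.mem_cons_of_mem _ hm)), hle, ?_⟩
      intro w hw
      rcases List.mem_cons.mp hw with rfl | hw
      · exact le_trans hle (not_lt.mp hc)
      · exact hall w hw

theorem minFold_none (l : List Int) (hl : l ≠ []) :
    ∃ v, l.foldl pyMinUpd none = some v ∧ v ∈ l ∧ ∀ w ∈ l, v ≤ w := by
  cases l with
  | nil => exact absurd rfl hl
  | cons h t =>
    obtain ⟨v, hv, hmem, hle, hall⟩ := minFold_some t h
    refine ⟨v, by simpa [pyMinUpd] using hv, ?_, ?_⟩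
    · exact hmem.elim (fun e => e ▸ List.mem_cons_self ..) (List.mem_cons_of_mem _)
    · intro w hw
      rcases List.mem_cons.mp hw with rfl | hw
      · exact hle
      · exact hall w hw


theorem solution_spec_main (n m k : Int) (a b : List Int) (hpre : Pre_solution n m k a b) :
    solution n m k a b = solution_alt n m k a b := by
  obtain ⟨ha, hb⟩ := hpre
  set bs := PySem.List.sorted b (fun v => v) false with hbs
  have hsorted : bs.Pairwise (· ≤ ·) := PySem.List.sorted_pairwise b (fun v => v)
  have hbsne : bs ≠ [] := by
    have hp : bs.Perm b := PySem.List.sorted_perm b (fun v => v) false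
    intro h
    exact hb ((h ▸ hp).symm.eq_nil)
  have hmem_bs : ∀ y, y ∈ bs ↔ y ∈ b := fun y => PySem.List.mem_sorted b _ false y
  rw [solution_eq, solution_alt_eq]
  -- the two flattened value lists
  set A := a.flatMap (fun x => b.map (fun y => fval k x y)) with hA
  set C := a.flatMap (candsOf k bs) with hC
  have hAne : A ≠ [] := by
    obtain ⟨x, hx⟩ := List.exists_mem_of_ne_nil a ha
    obtain ⟨y, hy⟩ := List.exists_mem_of_ne_nil b hb
    exact List.ne_nil_of_mem (List.mem_flatMap.mpr ⟨x, hx, List.mem_map_of_mem hy⟩)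
  have hCne : C ≠ [] := by
    obtain ⟨x, hx⟩ := List.exists_mem_of_ne_nil a ha
    obtain ⟨v, hv⟩ := cands_ne_nil k bs hsorted hbsne x
    exact List.ne_nil_of_mem (List.mem_flatMap.mpr ⟨x, hx, hv⟩)
  obtain ⟨vA, hvA, hvAmem, hvAmin⟩ := minFold_none A hAne
  obtain ⟨vC, hvC, hvCmem, hvCmin⟩ := minFold_none C hCne
  rw [hvA, hvC]
  -- vC is a pair value, so vA ≤ vC
  have hCsubA : ∀ v ∈ C, v ∈ A := by
    intro v hv
    obtain ⟨x, hx, hvc⟩ := List.mem_flatMap.mp hv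
    obtain ⟨y, hy, rfl⟩ := cands_sub k bs x v hvc
    exact List.mem_flatMap.mpr ⟨x, hx, List.mem_map_of_mem ((hmem_bs y).mp hy)⟩
  have h1 : vA ≤ vC := hvAmin vC (hCsubA vC hvCmem)
  -- vA is dominated by some candidate, so vC ≤ vA
  have h2 : vC ≤ vA := by
    obtain ⟨x, hx, hvy⟩ := List.mem_flatMap.mp hvAmem
    obtain ⟨y, hy, rfl⟩ := List.mem_map.mp hvy
    obtain ⟨v, hvmem, hvle⟩ := cands_dom k x y bs hsorted ((hmem_bs y).mpr hy)
    exact le_trans (hvCmin v (List.mem_flatMap.mpr ⟨x, hx, hvmem⟩)) hvle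
  simp [le_antisymm h1 h2]

-- ===== VERDICT (by name: the statement is the Claim_ definition above) =====
theorem solution_spec : Claim_equal_solution := by
  intro n m k a b _ hpre
  show solution n m k a b = solution_alt n m k a b
  exact solution_spec_main n m k a b hpre
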